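-- pv_equiv track=rewrite | github.com/creuter27/upstitch | Billbee-Artikelmanager/execution/dedup_physical.py | _default_keep_index
-- ===== SOURCE A (Python) =====
-- COL_BOM   = "BOM_SKUs"
--
-- def find_bom_references(rows: list[dict], sku: str) -> list[str]:
--     """Return listing SKUs whose BOM_SKUs cell contains this physical SKU."""
--     refs = []
--     for row in rows:
--         bom_cell = str(row.get(COL_BOM) or "").strip()
--         if not bom_cell:
--             continue
--         bom_skus = [s.strip() for s in bom_cell.split("|") if s.strip()]
--         if sku in bom_skus:
--             listing_sku = str(row.get("SKU") or "").strip()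
--             refs.append(listing_sku)
--     return refs
--
-- def _default_keep_index(group: list[dict], rows: list[dict]) -> int:
--     """
--     Suggest which entry to keep: most BOM references, then shortest SKU,
--     then alphabetically.  Returns 0-based index into group.
--     """
--     scored = []
--     for i, entry in enumerate(group):
--         sku = str(entry.get("SKU") or "").strip()
--         ref_count = len(find_bom_references(rows, sku))
--         scored.append((-ref_count, len(sku), sku, i))
--     scored.sort()
--     return scored[0][3]
-- ===== SOURCE B (Python) =====
-- COL_BOM = "BOM_SKUs"
--
-- def _default_keep_index(group: list[dict], rows: list[dict]) -> int:
--     # One pass over rows builds per-SKU reference counts (each row counted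
--     # once per distinct BOM SKU), then a single running-minimum pass over
--     # the group picks the best entry -- no per-entry rescan, no sort.
--     counts = {}
--     for row in rows:
--         cell = str(row.get(COL_BOM) or "").strip()
--         if not cell:
--             continue
--         seen = set()
--         for tok in cell.split("|"):
--             tok = tok.strip()
--             if tok:
--                 seen.add(tok)
--         for s in seen:
--             counts[s] = counts.get(s, 0) + 1
--     best = None
--     for i, entry in enumerate(group):
--         sku = str(entry.get("SKU") or "").strip()
--         key = (-counts.get(sku, 0), len(sku), sku)
--         if best is None or key < best[0]:
--             best = (key, i)
--     return best[1]
-- ===== Notes on version B (the rewrite author's own statement) =====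
-- stated objective: alternative
-- what changed: Instead of re-scanning all rows for every group entry and sorting the scored tuples, B builds a per-SKU reference counter in one pass over the rows (deduplicating BOM SKUs per row) and then keeps a running minimum key over the group; measured only ~1.3x on the generated inputs, so not claimed as faster.
import Mathlib
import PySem

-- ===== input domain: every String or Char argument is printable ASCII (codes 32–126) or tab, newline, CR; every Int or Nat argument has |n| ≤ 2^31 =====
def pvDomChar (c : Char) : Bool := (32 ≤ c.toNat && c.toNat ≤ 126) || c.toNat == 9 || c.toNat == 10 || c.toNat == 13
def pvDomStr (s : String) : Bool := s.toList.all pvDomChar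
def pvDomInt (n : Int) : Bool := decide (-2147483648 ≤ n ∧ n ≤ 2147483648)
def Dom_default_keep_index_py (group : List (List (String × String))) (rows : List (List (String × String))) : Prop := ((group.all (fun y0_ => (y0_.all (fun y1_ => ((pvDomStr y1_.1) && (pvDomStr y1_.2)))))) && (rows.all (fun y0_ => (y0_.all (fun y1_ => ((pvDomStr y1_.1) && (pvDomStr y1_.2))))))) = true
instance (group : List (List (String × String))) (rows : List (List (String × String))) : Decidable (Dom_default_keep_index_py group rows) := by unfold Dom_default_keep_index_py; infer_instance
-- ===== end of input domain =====

-- B replaces A's per-entry rescan of all rows plus a sort by one counting pass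
-- over the rows and a single running-minimum pass over the group.

-- ===== PORT A =====
-- str(row.get(k) or ""): the values are str, so this is the stored value if present and nonempty, else ""
def pvGetStr (row : List (String × String)) (k : String) : String :=
  ((PySem.Dict.mk row).get? k).getD ""

-- bom_cell = str(row.get(COL_BOM) or "").strip(); bom_skus = [s.strip() for s in bom_cell.split("|") if s.strip()]
-- ("|" ≠ "" so split? never fails)
def find_bom_references_py (rows : List (List (String × String))) (sku : String) : List String :=
  rows.foldl (fun refs row =>
    if PySem.Str.strip (pvGetStr row "BOM_SKUs") = "" then refs
    else
      if ((((PySem.Str.split? (PySem.Str.strip (pvGetStr row "BOM_SKUs")) "|").getD []).map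
            PySem.Str.strip).filter (fun s => !(s == ""))).contains sku
      then refs ++ [PySem.Str.strip (pvGetStr row "SKU")] else refs) []

-- Python's '<' on the 4-tuples (int, int, str, int), written out lexicographically (exact;
-- str '<' is Lean's String '<', code-point lexicographic)
def pvLt4 (a b : Int × Int × String × Int) : Bool :=
  decide (a.1 < b.1) || (a.1 == b.1 &&
    (decide (a.2.1 < b.2.1) || (a.2.1 == b.2.1 &&
      (decide (a.2.2.1 < b.2.2.1) || (a.2.2.1 == b.2.2.1 && decide (a.2.2.2 < b.2.2.2))))))

def default_keep_index_py (group : List (List (String × String))) (rows : List (List (String × String))) : Int :=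
  -- scored.append((-ref_count, len(sku), sku, i)) with sku = str(entry.get("SKU") or "").strip()
  let scored := (PySem.List.enumerate group).foldl (fun scored p =>
      scored ++ [(-(PySem.List.len (find_bom_references_py rows (PySem.Str.strip (pvGetStr p.2 "SKU")))),
        PySem.Str.len (PySem.Str.strip (pvGetStr p.2 "SKU")), PySem.Str.strip (pvGetStr p.2 "SKU"), p.1)]) []
  -- scored.sort(): Python's stable sort by '<' is the left fold of sorted insertion
  -- (PySem.List.sorted_eq_foldl_insertBy), with the tuple '<' as pvLt4
  let sortedScored := scored.foldl (fun acc x => PySem.List.insertBy pvLt4 x acc) []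
  -- scored[0][3]; IndexError on an empty group is excluded by Pre_
  (PySem.List.pyGetD sortedScored 0 (0, 0, "", 0)).2.2.2

-- ===== PORT B =====
-- Python's '<' on the 3-tuples (int, int, str)
def pvLt3 (a b : Int × Int × String) : Bool :=
  decide (a.1 < b.1) || (a.1 == b.1 &&
    (decide (a.2.1 < b.2.1) || (a.2.1 == b.2.1 && decide (a.2.2 < b.2.2))))

-- cell = str(row.get(COL_BOM) or "").strip(); seen = the set of stripped nonempty tokens of cell.split("|");
-- for s in seen: counts[s] = counts.get(s, 0) + 1  (the dict is only looked up afterwards,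
-- so iterating the set is order-independent)
def bom_counts (rows : List (List (String × String))) : PySem.Dict String Int :=
  rows.foldl (fun counts row =>
    if PySem.Str.strip (pvGetStr row "BOM_SKUs") = "" then counts
    else
      (((PySem.Str.split? (PySem.Str.strip (pvGetStr row "BOM_SKUs")) "|").getD []).foldl
          (fun seen tok => if PySem.Str.strip tok == "" then seen
            else PySem.Set.add seen (PySem.Str.strip tok)) PySem.Set.empty).foldl
        (fun counts s => counts.insert s (counts.getD s 0 + 1)) counts) PySem.Dict.empty

def default_keep_index_py_alt (group : List (List (String × String))) (rows : List (List (String × String))) : Int :=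
  let counts := bom_counts rows
  -- key = (-counts.get(sku, 0), len(sku), sku); keep the strictly smaller key, first index on ties
  let best := (PySem.List.enumerate group).foldl (fun best p =>
      match best with
      | none => some ((-(counts.getD (PySem.Str.strip (pvGetStr p.2 "SKU")) 0),
          PySem.Str.len (PySem.Str.strip (pvGetStr p.2 "SKU")), PySem.Str.strip (pvGetStr p.2 "SKU")), p.1)
      | some b => if pvLt3 (-(counts.getD (PySem.Str.strip (pvGetStr p.2 "SKU")) 0),
          PySem.Str.len (PySem.Str.strip (pvGetStr p.2 "SKU")), PySem.Str.strip (pvGetStr p.2 "SKU")) b.1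
          then some ((-(counts.getD (PySem.Str.strip (pvGetStr p.2 "SKU")) 0),
            PySem.Str.len (PySem.Str.strip (pvGetStr p.2 "SKU")), PySem.Str.strip (pvGetStr p.2 "SKU")), p.1)
          else some b) none
  -- best[1]; best is None only for an empty group (TypeError), excluded by Pre_
  match best with
  | some b => b.2
  | none => 0

-- ===== PRECONDITION & SPEC =====
-- A evaluates scored[0] (and B best[1]): both raise on an empty group, hence the only restriction.
def Pre_default_keep_index_py (group : List (List (String × String))) (rows : List (List (String × String))) : Prop := group ≠ []
instance (group : List (List (String × String))) (rows : List (List (String × String))) : Decidable (Pre_default_keep_index_py group rows) := by unfold Pre_default_keep_index_py; infer_instance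

def pvWitness_default_keep_index_py : (List (List (String × String))) × (List (List (String × String))) :=
  ([[("SKU", "a")]], [[("SKU", "b"), ("BOM_SKUs", "a|c")]])

def Spec_default_keep_index_py (group : List (List (String × String))) (rows : List (List (String × String))) (out : Int) : Prop := out = default_keep_index_py_alt group rows
instance (group : List (List (String × String))) (rows : List (List (String × String))) (out : Int) : Decidable (Spec_default_keep_index_py group rows out) := by unfold Spec_default_keep_index_py; infer_instance

-- ===== CLAIM (what is proved, stated in full; the proofs are below) =====
def Claim_equal_default_keep_index_py : Prop := ∀ (group : List (List (String × String))) (rows : List (List (String × String))), Dom_default_keep_index_py group rows → Pre_default_keep_index_py group rows → Spec_default_keep_index_py group rows (default_keep_index_py group rows)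

-- ===== LEMMAS AND PROOFS =====

def pvCell (row : List (String × String)) : String := PySem.Str.strip (pvGetStr row "BOM_SKUs")
def pvSku (row : List (String × String)) : String := PySem.Str.strip (pvGetStr row "SKU")
def pvToks (cell : String) : List String :=
  (((PySem.Str.split? cell "|").getD []).map PySem.Str.strip).filter (fun s => !(s == ""))
def pvPred (sku : String) (row : List (String × String)) : Bool := (pvToks (pvCell row)).contains sku
def pvKey (rows : List (List (String × String))) (row : List (String × String)) : Int × Int × String :=
  (-((bom_counts rows).getD (pvSku row) 0), PySem.Str.len (pvSku row), pvSku row)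

theorem pvToks_empty : pvToks "" = [] := by decide

theorem pvSeen_eq (l : List String) (s0 : PySem.Set String) :
    l.foldl (fun seen tok => if PySem.Str.strip tok == "" then seen
        else PySem.Set.add seen (PySem.Str.strip tok)) s0
      = ((l.map PySem.Str.strip).filter (fun s => !(s == ""))).foldl PySem.Set.add s0 := by
  induction l generalizing s0 with
  | nil => rfl
  | cons x t ih =>
      simp only [List.foldl_cons, List.map_cons, List.filter_cons]
      by_cases h : PySem.Str.strip x = ""
      · rw [if_pos (by simp [h]), if_neg (by simp [h])]
        exact ih s0
      · rw [if_neg (by simp [h]), if_pos (by simp [h]), List.foldl_cons]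
        exact ih (PySem.Set.add s0 (PySem.Str.strip x))

theorem pv_count_toks (toks : List String) (s : String) :
    (PySem.Set.ofList toks).count s = (if toks.contains s then 1 else 0) := by
  by_cases h : s ∈ toks
  · rw [List.count_eq_one_of_mem (PySem.Set.nodup_ofList toks) ((PySem.Set.mem_ofList toks s).2 h)]
    simp [h]
  · rw [List.count_eq_zero.2 (fun hc => h ((PySem.Set.mem_ofList toks s).1 hc))]
    simp [h]

theorem pv_counts_getD (rows : List (List (String × String))) (d : PySem.Dict String Int) (s : String) :
    (rows.foldl (fun counts row =>
        if PySem.Str.strip (pvGetStr row "BOM_SKUs") = "" then counts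
        else
          (((PySem.Str.split? (PySem.Str.strip (pvGetStr row "BOM_SKUs")) "|").getD []).foldl
              (fun seen tok => if PySem.Str.strip tok == "" then seen
                else PySem.Set.add seen (PySem.Str.strip tok)) PySem.Set.empty).foldl
            (fun counts s => counts.insert s (counts.getD s 0 + 1)) counts) d).getD s 0
      = d.getD s 0 + (rows.countP (pvPred s) : Int) := by
  induction rows generalizing d with
  | nil => simp
  | cons row t ih =>
      simp only [List.foldl_cons, List.countP_cons]
      by_cases h : PySem.Str.strip (pvGetStr row "BOM_SKUs") = ""
      · have hp : pvPred s row = false := by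
          simp only [pvPred, pvCell, h, pvToks_empty]; rfl
        rw [if_pos h, ih, hp]
        push_cast; ring
      · have hseen : (((PySem.Str.split? (PySem.Str.strip (pvGetStr row "BOM_SKUs")) "|").getD []).foldl
            (fun seen tok => if PySem.Str.strip tok == "" then seen
              else PySem.Set.add seen (PySem.Str.strip tok)) PySem.Set.empty)
            = PySem.Set.ofList (pvToks (pvCell row)) := by
          rw [pvSeen_eq, PySem.Set.ofList_eq_foldl]; rfl
        rw [if_neg h, ih, hseen, PySem.Dict.getD_foldl_insert_add_one, pv_count_toks]
        have hp : pvPred s row = (pvToks (pvCell row)).contains s := rfl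
        rw [hp]
        rcases Bool.eq_false_or_eq_true ((pvToks (pvCell row)).contains s) with hm | hm <;>
          rw [hm] <;> norm_num <;> push_cast <;> ring

theorem pv_bom_counts_getD (rows : List (List (String × String))) (s : String) :
    (bom_counts rows).getD s 0 = (rows.countP (pvPred s) : Int) := by
  have := pv_counts_getD rows PySem.Dict.empty s
  simpa [bom_counts] using this

theorem pv_refs_length (rows : List (List (String × String))) (sku : String) (acc : List String) :
    (rows.foldl (fun refs row =>
        if PySem.Str.strip (pvGetStr row "BOM_SKUs") = "" then refs
        else
          if ((((PySem.Str.split? (PySem.Str.strip (pvGetStr row "BOM_SKUs")) "|").getD []).map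
                PySem.Str.strip).filter (fun s => !(s == ""))).contains sku
          then refs ++ [PySem.Str.strip (pvGetStr row "SKU")] else refs) acc).length
      = acc.length + rows.countP (pvPred sku) := by
  induction rows generalizing acc with
  | nil => simp
  | cons row t ih =>
      simp only [List.foldl_cons, List.countP_cons]
      by_cases h : PySem.Str.strip (pvGetStr row "BOM_SKUs") = ""
      · have hp : pvPred sku row = false := by
          simp only [pvPred, pvCell, h, pvToks_empty]; rfl
        rw [if_pos h, ih, hp]
        simp
      · have hp : pvPred sku row = (pvToks (pvCell row)).contains sku := rfl
        rw [if_neg h, hp]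
        rcases Bool.eq_false_or_eq_true ((pvToks (pvCell row)).contains sku) with hm | hm
        · rw [show ((((PySem.Str.split? (PySem.Str.strip (pvGetStr row "BOM_SKUs")) "|").getD []).map
              PySem.Str.strip).filter (fun s => !(s == ""))).contains sku = true from hm, hm]
          simp only [if_true, ih, List.length_append]
          simp
          omega
        · rw [show ((((PySem.Str.split? (PySem.Str.strip (pvGetStr row "BOM_SKUs")) "|").getD []).map
              PySem.Str.strip).filter (fun s => !(s == ""))).contains sku = false from hm, hm]
          simp only [Bool.false_eq_true, if_false, ih]
          simp

-- A's scored entry equals (pvKey, index) flattened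
theorem pv_entry_eq (rows : List (List (String × String))) (p : Int × List (String × String)) :
    (-(PySem.List.len (find_bom_references_py rows (PySem.Str.strip (pvGetStr p.2 "SKU")))),
      PySem.Str.len (PySem.Str.strip (pvGetStr p.2 "SKU")), PySem.Str.strip (pvGetStr p.2 "SKU"), p.1)
    = ((pvKey rows p.2).1, (pvKey rows p.2).2.1, (pvKey rows p.2).2.2, p.1) := by
  have h1 : ((find_bom_references_py rows (PySem.Str.strip (pvGetStr p.2 "SKU"))).length : Int)
      = (bom_counts rows).getD (PySem.Str.strip (pvGetStr p.2 "SKU")) 0 := by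
    rw [show (bom_counts rows).getD (PySem.Str.strip (pvGetStr p.2 "SKU")) 0
        = (bom_counts rows).getD (pvSku p.2) 0 from rfl, pv_bom_counts_getD]
    unfold find_bom_references_py
    rw [pv_refs_length]
    simp [pvSku]
  simp [pvKey, pvSku, PySem.List.len_eq, h1]

-- head of the insertion-sort fold is the running minimum under lt
theorem pv_insert_head {α : Type} (lt : α → α → Bool) (xs : List α) (m : α) (t : List α) :
    ∃ t', xs.foldl (fun acc x => PySem.List.insertBy lt x acc) (m :: t)
      = (xs.foldl (fun b x => if lt x b then x else b) m) :: t' := by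
  induction xs generalizing m t with
  | nil => exact ⟨t, rfl⟩
  | cons x xs ih =>
      simp only [List.foldl_cons]
      have hins : PySem.List.insertBy lt x (m :: t)
          = if lt x m then x :: m :: t else m :: PySem.List.insertBy lt x t := by
        simp [PySem.List.insertBy]
      rw [hins]
      by_cases h : lt x m = true
      · rw [if_pos h, if_pos h]
        exact ih x (m :: t)
      · rw [if_neg h, if_neg h]
        exact ih m (PySem.List.insertBy lt x t)

theorem pvLt4_eq_pvLt3 (a b : Int × Int × String) (i j : Int) (h : j < i) :
    pvLt4 (a.1, a.2.1, a.2.2, i) (b.1, b.2.1, b.2.2, j) = pvLt3 a b := by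
  have hd : decide (i < j) = false := by simp; omega
  simp only [pvLt4, pvLt3, hd, Bool.and_false, Bool.or_false]

-- the 4-tuple running minimum (A, ties broken by the strictly larger incoming index,
-- i.e. never) is the 3-key running minimum with its index (B)
theorem pv_min_eq (rows : List (List (String × String))) (gs : List (List (String × String)))
    (s : Int) (k : Int × Int × String) (j : Int) (h : j < s) :
    ((PySem.List.enumerate gs s).foldl
        (fun b p => if pvLt4 ((pvKey rows p.2).1, (pvKey rows p.2).2.1, (pvKey rows p.2).2.2, p.1) b
          then ((pvKey rows p.2).1, (pvKey rows p.2).2.1, (pvKey rows p.2).2.2, p.1) else b)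
        (k.1, k.2.1, k.2.2, j)
      = (((PySem.List.enumerate gs s).foldl
          (fun b p => if pvLt3 (pvKey rows p.2) b.1 then (pvKey rows p.2, p.1) else b) (k, j)).1.1,
         ((PySem.List.enumerate gs s).foldl
          (fun b p => if pvLt3 (pvKey rows p.2) b.1 then (pvKey rows p.2, p.1) else b) (k, j)).1.2.1,
         ((PySem.List.enumerate gs s).foldl
          (fun b p => if pvLt3 (pvKey rows p.2) b.1 then (pvKey rows p.2, p.1) else b) (k, j)).1.2.2,
         ((PySem.List.enumerate gs s).foldl
          (fun b p => if pvLt3 (pvKey rows p.2) b.1 then (pvKey rows p.2, p.1) else b) (k, j)).2))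
    ∧ ((PySem.List.enumerate gs s).foldl
          (fun b p => if pvLt3 (pvKey rows p.2) b.1 then (pvKey rows p.2, p.1) else b) (k, j)).2 < s + gs.length := by
  induction gs generalizing s k j with
  | nil => simp [PySem.List.enumerate]; omega
  | cons g gs ih =>
      rw [PySem.List.enumerate_cons]
      simp only [List.foldl_cons]
      rw [pvLt4_eq_pvLt3 (pvKey rows g) k s j h]
      by_cases hc : pvLt3 (pvKey rows g) k = true
      · rw [if_pos hc, if_pos hc]
        have := ih (s + 1) (pvKey rows g) s (by omega)
        refine ⟨this.1, ?_⟩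
        have h2 := this.2
        simp only [List.length_cons]
        push_cast
        omega
      · rw [if_neg hc, if_neg hc]
        have := ih (s + 1) k j (by omega)
        refine ⟨this.1, ?_⟩
        have h2 := this.2
        simp only [List.length_cons]
        push_cast
        omega

-- B's option-valued fold with a 'some' accumulator is the plain pair fold
theorem pv_opt_fold (rows : List (List (String × String))) (gs : List (List (String × String)))
    (s : Int) (b : (Int × Int × String) × Int) :
    (PySem.List.enumerate gs s).foldl (fun best p =>
        match best with
        | none => some ((-((bom_counts rows).getD (PySem.Str.strip (pvGetStr p.2 "SKU")) 0),
            PySem.Str.len (PySem.Str.strip (pvGetStr p.2 "SKU")), PySem.Str.strip (pvGetStr p.2 "SKU")), p.1)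
        | some b => if pvLt3 (-((bom_counts rows).getD (PySem.Str.strip (pvGetStr p.2 "SKU")) 0),
            PySem.Str.len (PySem.Str.strip (pvGetStr p.2 "SKU")), PySem.Str.strip (pvGetStr p.2 "SKU")) b.1
            then some ((-((bom_counts rows).getD (PySem.Str.strip (pvGetStr p.2 "SKU")) 0),
              PySem.Str.len (PySem.Str.strip (pvGetStr p.2 "SKU")), PySem.Str.strip (pvGetStr p.2 "SKU")), p.1)
            else some b) (some b)
      = some ((PySem.List.enumerate gs s).foldl
          (fun b p => if pvLt3 (pvKey rows p.2) b.1 then (pvKey rows p.2, p.1) else b) b) := by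
  induction gs generalizing s b with
  | nil => simp [PySem.List.enumerate]
  | cons g gs ih =>
      rw [PySem.List.enumerate_cons]
      simp only [List.foldl_cons]
      have hk : (-((bom_counts rows).getD (PySem.Str.strip (pvGetStr g "SKU")) 0),
          PySem.Str.len (PySem.Str.strip (pvGetStr g "SKU")), PySem.Str.strip (pvGetStr g "SKU"))
          = pvKey rows g := by simp [pvKey, pvSku]
      simp only [hk]
      by_cases hc : pvLt3 (pvKey rows g) b.1 = true
      · rw [if_pos hc, if_pos hc, ih]
      · rw [if_neg hc, if_neg hc, ih]

theorem pv_entry_eq' (rows : List (List (String × String))) (i : Int) (e : List (String × String)) :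
    (-(PySem.List.len (find_bom_references_py rows (PySem.Str.strip (pvGetStr e "SKU")))),
      PySem.Str.len (PySem.Str.strip (pvGetStr e "SKU")), PySem.Str.strip (pvGetStr e "SKU"), i)
    = ((pvKey rows e).1, (pvKey rows e).2.1, (pvKey rows e).2.2, i) := pv_entry_eq rows (i, e)

-- B on a nonempty group: the first step turns none into some (key g0, 0), the rest is the pair fold
theorem pv_alt_cons (rows : List (List (String × String))) (g0 : List (String × String))
    (gs : List (List (String × String))) :
    default_keep_index_py_alt (g0 :: gs) rows
      = ((PySem.List.enumerate gs 1).foldl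
          (fun b p => if pvLt3 (pvKey rows p.2) b.1 then (pvKey rows p.2, p.1) else b)
          (pvKey rows g0, 0)).2 := by
  refine Eq.trans (b :=
    (match (PySem.List.enumerate gs 1).foldl (fun best p =>
        match best with
        | none => some ((-((bom_counts rows).getD (PySem.Str.strip (pvGetStr p.2 "SKU")) 0),
            PySem.Str.len (PySem.Str.strip (pvGetStr p.2 "SKU")), PySem.Str.strip (pvGetStr p.2 "SKU")), p.1)
        | some b => if pvLt3 (-((bom_counts rows).getD (PySem.Str.strip (pvGetStr p.2 "SKU")) 0),
            PySem.Str.len (PySem.Str.strip (pvGetStr p.2 "SKU")), PySem.Str.strip (pvGetStr p.2 "SKU")) b.1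
            then some ((-((bom_counts rows).getD (PySem.Str.strip (pvGetStr p.2 "SKU")) 0),
              PySem.Str.len (PySem.Str.strip (pvGetStr p.2 "SKU")), PySem.Str.strip (pvGetStr p.2 "SKU")), p.1)
            else some b) (some (pvKey rows g0, (0 : Int))) with
      | some b => b.2
      | none => 0)) rfl ?_
  rw [pv_opt_fold rows gs 1 (pvKey rows g0, (0 : Int))]

-- ===== VERDICT (by name: the statement is the Claim_ definition above) =====
theorem default_keep_index_py_spec : Claim_equal_default_keep_index_py := by
  intro group rows _hdom hpre
  unfold Spec_default_keep_index_py
  cases group with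
  | nil => exact absurd rfl hpre
  | cons g0 gs =>
      rw [pv_alt_cons]
      simp only [default_keep_index_py]
      rw [PySem.List.enumerate_cons]
      simp only [List.foldl_cons, List.nil_append, zero_add]
      -- A: scored = entry(0,g0) :: map entry (enumerate gs 1)
      rw [PySem.List.foldl_append_singleton_eq_map
        (f := fun p : Int × List (String × String) =>
          (-(PySem.List.len (find_bom_references_py rows (PySem.Str.strip (pvGetStr p.2 "SKU")))),
            PySem.Str.len (PySem.Str.strip (pvGetStr p.2 "SKU")), PySem.Str.strip (pvGetStr p.2 "SKU"), p.1))]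
      -- rewrite each scored entry to the pvKey form
      rw [List.map_congr_left (fun p _ => pv_entry_eq rows p), pv_entry_eq' rows 0 g0]
      -- split the fold over [head] ++ mapped tail
      rw [List.foldl_append]
      simp only [List.foldl_cons, List.foldl_nil]
      rw [show ∀ (x : Int × Int × String × Int), PySem.List.insertBy pvLt4 x [] = [x] from fun x => rfl]
      -- head of the insertion sort = running minimum
      obtain ⟨t', ht'⟩ := pv_insert_head pvLt4
        ((PySem.List.enumerate gs 1).map
          (fun p => ((pvKey rows p.2).1, (pvKey rows p.2).2.1, (pvKey rows p.2).2.2, p.1)))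
        ((pvKey rows g0).1, (pvKey rows g0).2.1, (pvKey rows g0).2.2, (0 : Int)) []
      rw [ht', PySem.List.pyGetD_zero_cons, List.foldl_map]
      -- A's 4-tuple minimum = B's keyed minimum with index
      rw [(pv_min_eq rows gs 1 (pvKey rows g0) 0 (by omega)).1]
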